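-- pv_equiv track=rewrite | github.com/wjddn279/Algorithms | Retry/활주로 건설.py | isgo
-- ===== SOURCE A (Python) =====
-- def isgo(arr,X):
--     start = 0
--     idx = 0
--     while idx < len(arr)-1:
--         num,next = arr[idx],arr[idx+1]
--         if abs(next-num) > 1:
--             return False
--         # 올라가는거
--         elif next-num == 1:
--             if idx-start+1 < X:
--                 return False
--             else:
--                 idx = idx+1
--                 start = idx
--         elif next-num == -1:
--             for r in range(X):
--                 idx += 1
--                 if idx >= len(arr) or arr[idx] != next:
--                     return False
--             start = idx+1
--         else:
--             idx += 1
--     return True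
-- ===== SOURCE B (Python) =====
-- def _consume(arr, visited, lo, hi, v):
--     # try to claim cells lo..hi-1: each must exist, have height v, and be unused
--     for j in range(lo, hi):
--         if j < 0 or j >= len(arr) or arr[j] != v or visited[j]:
--             return False
--         visited[j] = True
--     return True
--
-- def isgo(arr, X):
--     n = len(arr)
--     visited = [False] * n
--     for i in range(n - 1):
--         d = arr[i + 1] - arr[i]
--         if abs(d) > 1:
--             return False
--         if d == 1:
--             if not _consume(arr, visited, i - X + 1, i + 1, arr[i]):
--                 return False
--         elif d == -1:
--             if not _consume(arr, visited, i + 1, i + X + 1, arr[i + 1]):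
--                 return False
--     return True
-- ===== Notes on version B (the rewrite author's own statement) =====
-- stated objective: alternative
-- what changed: Replaces A's start-pointer scan that jumps idx over whole ramps with a uniform pass over every boundary index that records claimed cells in a visited array (a shared _consume helper claims the X cells of each ascending/descending ramp).
import Mathlib
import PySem

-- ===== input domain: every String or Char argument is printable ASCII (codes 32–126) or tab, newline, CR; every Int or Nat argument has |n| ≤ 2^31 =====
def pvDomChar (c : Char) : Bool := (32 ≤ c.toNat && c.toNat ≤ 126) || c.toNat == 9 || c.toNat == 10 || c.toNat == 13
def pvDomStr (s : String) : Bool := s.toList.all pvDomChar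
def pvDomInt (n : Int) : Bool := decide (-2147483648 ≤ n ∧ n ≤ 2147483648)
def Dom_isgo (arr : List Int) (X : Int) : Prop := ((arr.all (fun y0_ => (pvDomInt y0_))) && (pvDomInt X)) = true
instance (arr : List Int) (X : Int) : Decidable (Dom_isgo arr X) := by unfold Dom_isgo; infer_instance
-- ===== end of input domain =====

-- B replaces A's start-pointer/index-jumping scan by a per-boundary scan with a visited array (same results; return-value equivalence on Pre_, outside which A loops forever).


-- ===== PORT A =====
-- A's inner `for r in range(X)` loop of the descending branch: advance idx X times,
-- checking existence and height at each step; none = `return False`.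
def isgoConsume (arr : List Int) (next : Int) : Nat → Nat → Option Nat
  | 0, idx => some idx
  | r + 1, idx =>
      if arr.length ≤ idx + 1 ∨ arr.getD (idx + 1) 0 ≠ next then none
      else isgoConsume arr next r (idx + 1)

-- A's `while idx < len(arr)-1` loop over state (idx, start); fuel is a totality guard only
-- (the loop advances idx on every iteration whenever X ≥ 1, and Pre_ excludes the inputs
-- where Python's loop never advances).
def isgoLoop (arr : List Int) (X : Int) : Nat → Nat → Nat → Bool
  | 0, _, _ => false
  | fuel + 1, idx, start =>
      if idx + 1 < arr.length then
        if 1 < (arr.getD (idx + 1) 0 - arr.getD idx 0).natAbs then false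
        else if arr.getD (idx + 1) 0 - arr.getD idx 0 = 1 then
          if (idx : Int) - (start : Int) + 1 < X then false
          else isgoLoop arr X fuel (idx + 1) (idx + 1)
        else if arr.getD (idx + 1) 0 - arr.getD idx 0 = -1 then
          match isgoConsume arr (arr.getD (idx + 1) 0) X.toNat idx with
          | none => false
          | some idx' => isgoLoop arr X fuel idx' (idx' + 1)
        else isgoLoop arr X fuel (idx + 1) start
      else true

def isgo (arr : List Int) (X : Int) : Bool := isgoLoop arr X (arr.length + 1) 0 0

-- ===== PORT B =====
-- B's `_consume(arr, visited, lo, hi, v)`: claim cells lo..hi-1 (they must exist, have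
-- height v and be unclaimed), marking them in the visited array; none = `return False`.
def altConsume (arr : List Int) (v : Int) : List Int → List Bool → Option (List Bool)
  | [], vis => some vis
  | j :: js, vis =>
      if j < 0 ∨ (arr.length : Int) ≤ j ∨ arr.getD j.toNat 0 ≠ v ∨ vis.getD j.toNat false = true
      then none
      else altConsume arr v js (vis.set j.toNat true)

-- B's `for i in range(n-1)` loop over every boundary, carrying the visited array.
def altLoop (arr : List Int) (X : Int) (i : Nat) (vis : List Bool) : Bool :=
  if i + 1 < arr.length then
    if 1 < (arr.getD (i + 1) 0 - arr.getD i 0).natAbs then false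
    else if arr.getD (i + 1) 0 - arr.getD i 0 = 1 then
      match altConsume arr (arr.getD i 0) (PySem.List.pyRange ((i : Int) - X + 1) ((i : Int) + 1) 1) vis with
      | none => false
      | some vis' => altLoop arr X (i + 1) vis'
    else if arr.getD (i + 1) 0 - arr.getD i 0 = -1 then
      match altConsume arr (arr.getD (i + 1) 0) (PySem.List.pyRange ((i : Int) + 1) ((i : Int) + X + 1) 1) vis with
      | none => false
      | some vis' => altLoop arr X (i + 1) vis'
    else altLoop arr X (i + 1) vis
  else true
termination_by arr.length - i

def isgo_alt (arr : List Int) (X : Int) : Bool := altLoop arr X 0 (List.replicate arr.length false)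

-- ===== PRECONDITION & SPEC =====
-- Pre_ excludes exactly the inputs on which Python A never returns: when X ≤ 0 the descending
-- branch runs `for r in range(X)` zero times and never advances idx, so A loops forever as soon
-- as a descending boundary is reached (every earlier boundary having |difference| ≤ 1).
def Pre_isgo (arr : List Int) (X : Int) : Prop :=
  1 ≤ X ∨ ∀ i ∈ List.range arr.length,
    ¬(i + 1 < arr.length ∧ arr.getD (i + 1) 0 - arr.getD i 0 = -1 ∧
      ∀ j ∈ List.range i, (arr.getD (j + 1) 0 - arr.getD j 0).natAbs ≤ 1)
instance (arr : List Int) (X : Int) : Decidable (Pre_isgo arr X) := by unfold Pre_isgo; infer_instance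

def pvWitness_isgo : List Int × Int := ([0, 0, 1, 1, 0, 0], 2)

def Spec_isgo (arr : List Int) (X : Int) (out : Bool) : Prop := out = isgo_alt arr X
instance (arr : List Int) (X : Int) (out : Bool) : Decidable (Spec_isgo arr X out) := by unfold Spec_isgo; infer_instance

-- ===== CLAIM (what is proved, stated in full; the proofs are below) =====
def Claim_equal_isgo : Prop := ∀ (arr : List Int) (X : Int), Dom_isgo arr X → Pre_isgo arr X → Spec_isgo arr X (isgo arr X)

-- ===== LEMMAS AND PROOFS =====

-- getD/set helpers for the visited array
theorem getD_set_self (vis : List Bool) (m : Nat) (h : m < vis.length) :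
    (vis.set m true).getD m false = true := by
  simp [List.getD_eq_getElem?_getD, List.getElem?_set, h]


theorem getD_set_ne (vis : List Bool) (m k : Nat) (h : m ≠ k) :
    (vis.set m true).getD k false = vis.getD k false := by
  simp [List.getD_eq_getElem?_getD, h]

theorem getD_set_mono (vis : List Bool) (m k : Nat) (h : vis.getD k false = true) :
    (vis.set m true).getD k false = true := by
  by_cases hmk : m = k
  · subst hmk
    have hlt : m < vis.length := by
      by_contra hge
      simp [List.getD_eq_getElem?_getD, List.getElem?_eq_none (le_of_not_gt hge)] at h
    exact getD_set_self vis m hlt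
  · rw [getD_set_ne vis m k hmk]; exact h

theorem getD_replicate_false (n j : Nat) : (List.replicate n false).getD j false = false := by
  simp [List.getD_eq_getElem?_getD, List.getElem?_replicate]
  split <;> simp

-- A's consume loop succeeds (returning idx + k) when every stepped-on cell exists and has height next
theorem isgoConsume_some (arr : List Int) (next : Int) (k idx : Nat)
    (h : ∀ r, 1 ≤ r → r ≤ k → idx + r < arr.length ∧ arr.getD (idx + r) 0 = next) :
    isgoConsume arr next k idx = some (idx + k) := by
  induction k generalizing idx with
  | zero => simp [isgoConsume]
  | succ r ih =>
      have h1 := h 1 (by omega) (by omega)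
      rw [isgoConsume]
      rw [if_neg (by push_neg; exact ⟨by omega, by simpa using h1.2⟩)]
      have heq := ih (idx + 1) (fun s hs1 hs2 => by
        have hh := h (s + 1) (by omega) (by omega)
        refine ⟨by omega, ?_⟩
        have he : idx + 1 + s = idx + (s + 1) := by omega
        rw [he]; exact hh.2)
      rw [heq]; congr 1; omega

-- A's consume loop fails when some stepped-on cell is missing or has the wrong height
theorem isgoConsume_none (arr : List Int) (next : Int) (k idx : Nat)
    (h : ∃ r, 1 ≤ r ∧ r ≤ k ∧ (arr.length ≤ idx + r ∨ arr.getD (idx + r) 0 ≠ next)) :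
    isgoConsume arr next k idx = none := by
  induction k generalizing idx with
  | zero => obtain ⟨r, h1, h2, _⟩ := h; omega
  | succ r ih =>
      rw [isgoConsume]
      by_cases hbad : arr.length ≤ idx + 1 ∨ arr.getD (idx + 1) 0 ≠ next
      · rw [if_pos hbad]
      · rw [if_neg hbad]
        apply ih
        obtain ⟨s, hs1, hs2, hb⟩ := h
        have hs : s ≠ 1 := by
          rintro rfl
          push_neg at hbad
          rcases hb with hb | hb
          · omega
          · exact hb hbad.2
        refine ⟨s - 1, by omega, by omega, ?_⟩
        have he : idx + 1 + (s - 1) = idx + s := by omega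
        rw [he]; exact hb

-- B's consume fails as soon as some requested cell is out of range, of the wrong height, or already visited
theorem altConsume_none (arr : List Int) (v : Int) (js : List Int) (vis : List Bool)
    (h : ∃ j ∈ js, j < 0 ∨ (arr.length : Int) ≤ j ∨ arr.getD j.toNat 0 ≠ v ∨ vis.getD j.toNat false = true) :
    altConsume arr v js vis = none := by
  induction js generalizing vis with
  | nil => simp at h
  | cons j0 js ih =>
      rw [altConsume]
      by_cases hbad : j0 < 0 ∨ (arr.length : Int) ≤ j0 ∨ arr.getD j0.toNat 0 ≠ v ∨ vis.getD j0.toNat false = true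
      · rw [if_pos hbad]
      · rw [if_neg hbad]
        apply ih
        obtain ⟨j, hj, hb⟩ := h
        rcases List.mem_cons.mp hj with rfl | hmem
        · exact absurd hb hbad
        · refine ⟨j, hmem, ?_⟩
          rcases hb with h1 | h1 | h1 | h1
          · exact Or.inl h1
          · exact Or.inr (Or.inl h1)
          · exact Or.inr (Or.inr (Or.inl h1))
          · exact Or.inr (Or.inr (Or.inr (getD_set_mono _ _ _ h1)))

-- B's consume succeeds when all requested cells are in range, of the right height and unvisited,
-- and the result is vis with exactly those cells marked
theorem altConsume_some (arr : List Int) (v : Int) (js : List Int) (vis : List Bool)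
    (hnd : js.Nodup) (hlenv : vis.length = arr.length)
    (h : ∀ j ∈ js, 0 ≤ j ∧ j < (arr.length : Int) ∧ arr.getD j.toNat 0 = v ∧ vis.getD j.toNat false = false) :
    ∃ vis', altConsume arr v js vis = some vis' ∧ vis'.length = vis.length ∧
      ∀ k : Nat, vis'.getD k false = (decide ((k : Int) ∈ js) || vis.getD k false) := by
  induction js generalizing vis with
  | nil => exact ⟨vis, rfl, rfl, fun k => by simp⟩
  | cons j0 js ih =>
      obtain ⟨h0, hrest⟩ := List.forall_mem_cons.mp h
      obtain ⟨hj0, hndt⟩ := List.nodup_cons.mp hnd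
      rw [altConsume]
      rw [if_neg (by push_neg
                     exact ⟨by omega, by omega, h0.2.2.1, by rw [h0.2.2.2]; decide⟩)]
      obtain ⟨vis', heq, hlen', hchar⟩ := ih (vis.set j0.toNat true) hndt
        (by simp [hlenv])
        (by intro j hj
            obtain ⟨hj1, hj2, hj3, hj4⟩ := hrest j hj
            refine ⟨hj1, hj2, hj3, ?_⟩
            have hne : j0.toNat ≠ j.toNat := by
              intro hc
              exact hj0 (by rw [show j0 = j by omega]; exact hj)
            rw [getD_set_ne vis _ _ hne]; exact hj4)
      refine ⟨vis', heq, by rw [hlen']; simp, fun k => ?_⟩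
      rw [hchar k]
      by_cases hk : (k : Int) = j0
      · have hkn : k = j0.toNat := by omega
        subst hkn
        rw [getD_set_self vis _ (by rw [hlenv]; omega)]
        simp [hk]
      · have hne : j0.toNat ≠ k := by intro hc; apply hk; omega
        rw [getD_set_ne vis _ _ hne]
        simp [List.mem_cons, hk]

-- skipping the flat boundaries inside a just-consumed descending run
theorem altLoop_flat_skip (arr : List Int) (X : Int) (vis : List Bool) (a b : Nat)
    (hb : b < arr.length)
    (hflat : ∀ m, a ≤ m → m ≤ b → arr.getD m 0 = arr.getD b 0)
    (hle : a ≤ b) :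
    altLoop arr X a vis = altLoop arr X b vis := by
  induction hd : b - a generalizing a with
  | zero => have hab : a = b := by omega
            subst hab; rfl
  | succ n ih =>
      have ha : a < b := by omega
      have h1 : a + 1 < arr.length := by omega
      have hd0 : arr.getD (a + 1) 0 - arr.getD a 0 = 0 := by
        rw [hflat a (le_refl a) (by omega), hflat (a + 1) (by omega) (by omega)]
        ring
      rw [altLoop, if_pos h1, hd0]
      norm_num
      exact ih (a + 1) (fun m hm1 hm2 => hflat m (by omega) hm2) (by omega) (by omega)

-- main loop equivalence for X ≥ 1
theorem main_loop_eq (arr : List Int) (X : Int) (hX : 1 ≤ X) :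
    ∀ fuel idx start vis,
      arr.length + 1 ≤ fuel + idx →
      idx ≤ arr.length →
      start ≤ idx + 1 →
      vis.length = arr.length →
      (∀ j, start ≤ j → vis.getD j false = false) →
      (∀ j, start ≤ j → j ≤ idx → arr.getD j 0 = arr.getD idx 0) →
      (start = 0 ∨ vis.getD (start - 1) false = true ∨
        (start ≤ idx ∧ arr.getD (start - 1) 0 ≠ arr.getD idx 0)) →
      isgoLoop arr X fuel idx start = altLoop arr X idx vis := by
  intro fuel
  induction fuel with
  | zero => intro idx start vis hfuel hidx hstart hlenv hunvis hflat hmark; omega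
  | succ fuel ih =>
      intro idx start vis hfuel hidx hstart hlenv hunvis hflat hmark
      rw [isgoLoop, altLoop]
      by_cases hcont : idx + 1 < arr.length
      case neg => rw [if_neg hcont, if_neg hcont]
      rw [if_pos hcont, if_pos hcont]
      by_cases habs : 1 < (arr.getD (idx + 1) 0 - arr.getD idx 0).natAbs
      · rw [if_pos habs, if_pos habs]
      rw [if_neg habs, if_neg habs]
      by_cases hup : arr.getD (idx + 1) 0 - arr.getD idx 0 = 1
      · rw [if_pos hup, if_pos hup]
        by_cases hpass : (idx : Int) - (start : Int) + 1 < X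
        · rw [if_pos hpass]
          have hnone : altConsume arr (arr.getD idx 0)
              (PySem.List.pyRange ((idx : Int) - X + 1) ((idx : Int) + 1) 1) vis = none := by
            apply altConsume_none
            by_cases hs0 : start = 0
            · exact ⟨(idx : Int) - X + 1,
                (PySem.List.mem_pyRange_one).mpr ⟨le_refl _, by omega⟩,
                Or.inl (by omega)⟩
            · refine ⟨(start : Int) - 1,
                (PySem.List.mem_pyRange_one).mpr ⟨by omega, by omega⟩, ?_⟩
              have htn : ((start : Int) - 1).toNat = start - 1 := by omega
              rcases hmark with h | h | h
              · omega
              · exact Or.inr (Or.inr (Or.inr (by rw [htn]; exact h)))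
              · exact Or.inr (Or.inr (Or.inl (by rw [htn]; exact h.2)))
          rw [hnone]
        · rw [if_neg hpass]
          obtain ⟨vis', heq, hlen', hchar⟩ := altConsume_some arr (arr.getD idx 0)
            (PySem.List.pyRange ((idx : Int) - X + 1) ((idx : Int) + 1) 1) vis
            (PySem.List.nodup_pyRange_one _ _) hlenv
            (by intro j hj
                obtain ⟨hj1, hj2⟩ := (PySem.List.mem_pyRange_one).mp hj
                have hjs : (start : Int) ≤ j := by omega
                have hji : j.toNat ≤ idx := by omega
                refine ⟨by omega, by omega, ?_, hunvis j.toNat (by omega)⟩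
                exact hflat j.toNat (by omega) hji)
          rw [heq]
          show isgoLoop arr X fuel (idx + 1) (idx + 1) = altLoop arr X (idx + 1) vis'
          apply ih (idx + 1) (idx + 1) vis' (by omega) (by omega) (by omega)
            (by rw [hlen']; exact hlenv)
          · intro j hj
            rw [hchar j]
            have hm : ¬((j : Int) ∈ PySem.List.pyRange ((idx : Int) - X + 1) ((idx : Int) + 1) 1) := by
              rw [PySem.List.mem_pyRange_one]; omega
            rw [decide_eq_false hm, Bool.false_or]
            exact hunvis j (by omega)
          · intro j hj1 hj2
            have hj : j = idx + 1 := by omega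
            subst hj; rfl
          · refine Or.inr (Or.inl ?_)
            show vis'.getD idx false = true
            rw [hchar idx]
            have hm : (idx : Int) ∈ PySem.List.pyRange ((idx : Int) - X + 1) ((idx : Int) + 1) 1 := by
              rw [PySem.List.mem_pyRange_one]; omega
            rw [decide_eq_true hm, Bool.true_or]
      rw [if_neg hup, if_neg hup]
      by_cases hdown : arr.getD (idx + 1) 0 - arr.getD idx 0 = -1
      · rw [if_pos hdown, if_pos hdown]
        by_cases hall : ∀ r, 1 ≤ r → r ≤ X.toNat →
            idx + r < arr.length ∧ arr.getD (idx + r) 0 = arr.getD (idx + 1) 0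
        · rw [isgoConsume_some arr (arr.getD (idx + 1) 0) X.toNat idx hall]
          obtain ⟨vis', heq, hlen', hchar⟩ := altConsume_some arr (arr.getD (idx + 1) 0)
            (PySem.List.pyRange ((idx : Int) + 1) ((idx : Int) + X + 1) 1) vis
            (PySem.List.nodup_pyRange_one _ _) hlenv
            (by intro j hj
                obtain ⟨hj1, hj2⟩ := (PySem.List.mem_pyRange_one).mp hj
                have hr : j.toNat = idx + (j.toNat - idx) ∧ 1 ≤ j.toNat - idx ∧
                    j.toNat - idx ≤ X.toNat := by omega
                obtain ⟨hre, hr1, hr2⟩ := hr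
                obtain ⟨hlt, hval⟩ := hall (j.toNat - idx) hr1 hr2
                refine ⟨by omega, by omega, by rw [hre]; exact hval,
                  hunvis j.toNat (by omega)⟩)
          rw [heq]
          have hend := hall X.toNat (by omega) (le_refl _)
          show isgoLoop arr X fuel (idx + X.toNat) (idx + X.toNat + 1) = altLoop arr X (idx + 1) vis'
          rw [altLoop_flat_skip arr X vis' (idx + 1) (idx + X.toNat) hend.1
            (by intro m hm1 hm2
                have h1 := hall (m - idx) (by omega) (by omega)
                have h2 := hall X.toNat (by omega) (le_refl _)
                rw [show idx + (m - idx) = m from by omega] at h1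
                rw [h1.2, h2.2]) (by omega)]
          apply ih (idx + X.toNat) (idx + X.toNat + 1) vis' (by omega) (by omega)
            (by omega) (by rw [hlen']; exact hlenv)
          · intro j hj
            rw [hchar j]
            have hm : ¬((j : Int) ∈ PySem.List.pyRange ((idx : Int) + 1) ((idx : Int) + X + 1) 1) := by
              rw [PySem.List.mem_pyRange_one]; omega
            rw [decide_eq_false hm, Bool.false_or]
            exact hunvis j (by omega)
          · intro j hj1 hj2
            have hj : j = idx + X.toNat := by omega
            subst hj; rfl
          · refine Or.inr (Or.inl ?_)
            show vis'.getD (idx + X.toNat) false = true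
            rw [hchar (idx + X.toNat)]
            have hm : ((idx + X.toNat : Nat) : Int) ∈
                PySem.List.pyRange ((idx : Int) + 1) ((idx : Int) + X + 1) 1 := by
              rw [PySem.List.mem_pyRange_one]; omega
            rw [decide_eq_true hm, Bool.true_or]
        · push_neg at hall
          obtain ⟨r, hr1, hr2, hbad⟩ := hall
          have hb' : arr.length ≤ idx + r ∨ arr.getD (idx + r) 0 ≠ arr.getD (idx + 1) 0 := by
            by_cases hlt : idx + r < arr.length
            · exact Or.inr (hbad hlt)
            · exact Or.inl (by omega)
          rw [isgoConsume_none arr (arr.getD (idx + 1) 0) X.toNat idx ⟨r, hr1, hr2, hb'⟩]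
          have hnone : altConsume arr (arr.getD (idx + 1) 0)
              (PySem.List.pyRange ((idx : Int) + 1) ((idx : Int) + X + 1) 1) vis = none := by
            apply altConsume_none
            refine ⟨(idx : Int) + r, (PySem.List.mem_pyRange_one).mpr ⟨by omega, by omega⟩, ?_⟩
            have htn : ((idx : Int) + r).toNat = idx + r := by omega
            rcases hb' with h | h
            · exact Or.inr (Or.inl (by omega))
            · exact Or.inr (Or.inr (Or.inl (by rw [htn]; exact h)))
          rw [hnone]
      · rw [if_neg hdown, if_neg hdown]
        have h0 : arr.getD (idx + 1) 0 - arr.getD idx 0 = 0 := by omega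
        apply ih (idx + 1) start vis (by omega) (by omega) (by omega) hlenv hunvis
        · intro j hj1 hj2
          rcases Nat.lt_succ_iff_lt_or_eq.mp (Nat.lt_succ_of_le hj2) with h | h
          · rw [hflat j hj1 (by omega)]; omega
          · subst h; rfl
        · rcases hmark with h | h | h
          · exact Or.inl h
          · exact Or.inr (Or.inl h)
          · refine Or.inr (Or.inr ⟨by omega, ?_⟩)
            rw [show arr.getD (idx + 1) 0 = arr.getD idx 0 from by omega]
            exact h.2

-- loop equivalence for X ≤ 0 when no descending boundary is reachable
theorem nodesc_loop_eq (arr : List Int) (X : Int) (hX : X ≤ 0)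
    (hnd : ∀ i, i + 1 < arr.length → arr.getD (i + 1) 0 - arr.getD i 0 = -1 →
      ∃ j, j < i ∧ 1 < (arr.getD (j + 1) 0 - arr.getD j 0).natAbs) :
    ∀ fuel idx start vis,
      arr.length + 1 ≤ fuel + idx →
      idx ≤ arr.length →
      start ≤ idx →
      (∀ j, j < idx → (arr.getD (j + 1) 0 - arr.getD j 0).natAbs ≤ 1) →
      isgoLoop arr X fuel idx start = altLoop arr X idx vis := by
  intro fuel
  induction fuel with
  | zero => intro idx start vis hfuel hidx hstart hclean; omega
  | succ fuel ih =>
      intro idx start vis hfuel hidx hstart hclean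
      rw [isgoLoop, altLoop]
      by_cases hcont : idx + 1 < arr.length
      · rw [if_pos hcont, if_pos hcont]
        by_cases habs : 1 < (arr.getD (idx + 1) 0 - arr.getD idx 0).natAbs
        · rw [if_pos habs, if_pos habs]
        · rw [if_neg habs, if_neg habs]
          by_cases hup : arr.getD (idx + 1) 0 - arr.getD idx 0 = 1
          · rw [if_pos hup, if_pos hup,
                if_neg (by omega),
                PySem.List.pyRange_one_eq_nil (by omega)]
            show isgoLoop arr X fuel (idx + 1) (idx + 1) = altLoop arr X (idx + 1) vis
            exact ih (idx + 1) (idx + 1) vis (by omega) (by omega) (le_refl _)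
              (fun j hj => by rcases Nat.lt_succ_iff_lt_or_eq.mp hj with h | h
                              · exact hclean j h
                              · subst h; omega)
          · rw [if_neg hup, if_neg hup]
            by_cases hdown : arr.getD (idx + 1) 0 - arr.getD idx 0 = -1
            · exfalso
              obtain ⟨j, hj, hgt⟩ := hnd idx hcont hdown
              have := hclean j hj
              omega
            · rw [if_neg hdown, if_neg hdown]
              exact ih (idx + 1) start vis (by omega) (by omega) (by omega)
                (fun j hj => by rcases Nat.lt_succ_iff_lt_or_eq.mp hj with h | h
                                · exact hclean j h
                                · subst h; omega)
      · rw [if_neg hcont, if_neg hcont]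

-- ===== VERDICT (by name: the statement is the Claim_ definition above) =====
theorem isgo_spec : Claim_equal_isgo := by
  intro arr X _ hpre
  unfold Spec_isgo isgo isgo_alt
  by_cases hX : 1 ≤ X
  · exact main_loop_eq arr X hX (arr.length + 1) 0 0 _ (by omega) (by omega) (by omega)
      (by simp) (fun j _ => getD_replicate_false _ _)
      (fun j _ h2 => by have hj : j = 0 := by omega
                        subst hj; rfl)
      (Or.inl rfl)
  · rcases hpre with h | hnd0
    · omega
    · apply nodesc_loop_eq arr X (by omega) ?_ (arr.length + 1) 0 0 _
        (by omega) (by omega) (le_refl 0) (fun j hj => by omega)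
      intro i h1 h2
      have hni := hnd0 i (List.mem_range.mpr (by omega))
      by_contra hno
      push_neg at hno
      exact hni ⟨h1, h2, fun j hj => by have := hno j (List.mem_range.mp hj); omega⟩
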